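-- pv_equiv track=rewrite | github.com/Jared-Kodero/ufs_py | py_scripts/fv3gfs_cpu_config.py | _nearest_valid
-- ===== SOURCE A (Python) =====
-- def _nearest_valid(target: int, valid: list[int], minimum: int) -> int:
--     """
--     Return the largest valid value <= target, but never below minimum.
--     Falls back to the smallest valid value >= minimum.
--     """
--     candidates = [v for v in valid if minimum <= v <= target]
--     if candidates:
--         return candidates[-1]
--     candidates = [v for v in valid if v >= minimum]
--     if candidates:
--         return candidates[0]
--     return minimum
-- ===== SOURCE B (Python) =====
-- def _nearest_valid(target: int, valid: list[int], minimum: int) -> int: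
--     # Scan back-to-front: the first in-range value met is A's last candidate,
--     # and early-return it; otherwise keep overwriting fallback with each
--     # value >= minimum, so it ends on the forward-first such value.
--     fallback = None
--     for v in reversed(valid):
--         if minimum <= v <= target:
--             return v
--         if v >= minimum:
--             fallback = v
--     return fallback if fallback is not None else minimum
-- ===== Notes on version B (the rewrite author's own statement) =====
-- stated objective: alternative
-- what changed: Traverses valid back-to-front with an early return at the first in-range value (A's candidates[-1]) instead of A's two forward list-comprehension passes; the fallback accumulator is overwritten along the reverse walk so it ends on the forward-first value >= minimum.
import Mathlib
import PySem

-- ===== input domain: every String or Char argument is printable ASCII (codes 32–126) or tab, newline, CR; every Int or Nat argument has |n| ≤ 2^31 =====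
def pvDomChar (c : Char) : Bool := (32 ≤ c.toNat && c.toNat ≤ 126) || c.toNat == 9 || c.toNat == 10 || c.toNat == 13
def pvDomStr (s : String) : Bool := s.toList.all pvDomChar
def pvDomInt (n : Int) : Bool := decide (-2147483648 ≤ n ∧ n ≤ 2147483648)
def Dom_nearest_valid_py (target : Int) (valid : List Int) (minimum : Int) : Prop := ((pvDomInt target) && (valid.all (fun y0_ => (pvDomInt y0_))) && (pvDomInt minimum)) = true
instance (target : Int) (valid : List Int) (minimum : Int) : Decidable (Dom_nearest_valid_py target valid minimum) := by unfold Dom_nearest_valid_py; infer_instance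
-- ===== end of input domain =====

-- ===== PORT A =====
-- B walks valid back-to-front with an early return at the first in-range value, instead of A's two forward comprehension passes; same return value, no speed claim.
def nearest_valid_py (target : Int) (valid : List Int) (minimum : Int) : Int :=
  let candidates := valid.filter (fun v => decide (minimum ≤ v) && decide (v ≤ target))
  match candidates.getLast? with
  | some x => x
  | none =>
    let candidates2 := valid.filter (fun v => decide (v ≥ minimum))
    match candidates2.head? with
    | some x => x
    | none => minimum

-- ===== PORT B =====
-- loop body of Source B: recursion over the reversed list, carrying the fallback accumulator
def nvGo (target minimum : Int) : List Int → Option Int → Int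
  | [], fallback => fallback.getD minimum
  | v :: rest, fallback =>
    if minimum ≤ v ∧ v ≤ target then v
    else nvGo target minimum rest (if minimum ≤ v then some v else fallback)

def nearest_valid_py_alt (target : Int) (valid : List Int) (minimum : Int) : Int :=
  nvGo target minimum valid.reverse none

-- ===== PRECONDITION & SPEC =====
def Spec_nearest_valid_py (target : Int) (valid : List Int) (minimum : Int) (out : Int) : Prop := out = nearest_valid_py_alt target valid minimum
instance (target : Int) (valid : List Int) (minimum : Int) (out : Int) : Decidable (Spec_nearest_valid_py target valid minimum out) := by unfold Spec_nearest_valid_py; infer_instance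

-- ===== CLAIM (what is proved, stated in full; the proofs are below) =====
def Claim_equal_nearest_valid_py : Prop := ∀ (target : Int) (valid : List Int) (minimum : Int), Dom_nearest_valid_py target valid minimum → Spec_nearest_valid_py target valid minimum (nearest_valid_py target valid minimum)

-- ===== LEMMAS AND PROOFS =====
-- nvGo on a list l equals: first in-range element of l if any, else the LAST
-- element of l that is ≥ minimum (it keeps overwriting fallback), else fallback.
theorem nvGo_char (target minimum : Int) (l : List Int) (fb : Option Int) :
    nvGo target minimum l fb =
      match (l.filter (fun v => decide (minimum ≤ v) && decide (v ≤ target))).head? with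
      | some x => x
      | none =>
        match (l.filter (fun v => decide (v ≥ minimum))).getLast? with
        | some y => y
        | none => fb.getD minimum := by
  induction l generalizing fb with
  | nil => simp [nvGo]
  | cons v rest ih =>
    simp only [nvGo, List.filter_cons]
    by_cases h1 : minimum ≤ v ∧ v ≤ target
    · rw [if_pos h1, if_pos (show (decide (minimum ≤ v) && decide (v ≤ target)) = true by
        simp [h1.1, h1.2])]
      simp
    · rw [if_neg h1, if_neg (show ¬ (decide (minimum ≤ v) && decide (v ≤ target)) = true by
        simp only [Bool.and_eq_true, decide_eq_true_eq]; exact h1)]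
      by_cases h2 : minimum ≤ v
      · rw [if_pos h2, if_pos (show decide (v ≥ minimum) = true by simpa [ge_iff_le] using h2)]
        rw [ih]
        cases hc : (rest.filter (fun v => decide (minimum ≤ v) && decide (v ≤ target))).head? with
        | some x => simp
        | none =>
          simp only
          cases hg : (rest.filter (fun v => decide (v ≥ minimum))).getLast? with
          | some y =>
            have : ((v :: rest.filter (fun v => decide (v ≥ minimum))).getLast?) = some y := by
              rw [List.getLast?_cons, hg]; rfl
            simp [this]
          | none =>
            have hnil : rest.filter (fun v => decide (v ≥ minimum)) = [] := by
              simpa using hg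
            simp [hnil]
      · rw [if_neg h2, if_neg (show ¬ decide (v ≥ minimum) = true by
          simpa [ge_iff_le] using h2)]
        exact ih fb

-- ===== VERDICT (by name: the statement is the Claim_ definition above) =====
theorem nearest_valid_py_spec : Claim_equal_nearest_valid_py := by
  intro target valid minimum _
  unfold Spec_nearest_valid_py nearest_valid_py nearest_valid_py_alt
  rw [nvGo_char]
  simp only [List.filter_reverse, List.head?_reverse, List.getLast?_reverse, Option.getD_none]
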